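-- pv_equiv track=rewrite | github.com/KrisV123/web-scraping | project/modules/read_pdf.py | format_spaces
-- ===== SOURCE A (Python) =====
-- def format_spaces(text: str) -> str:
--     """Removes consecutive whitespace chars
--     Returns:
--     formated text
--     """
--
--     formated_text = str()
--     index = 0
--
--     while index < len(text) and text[index] in [' ', r'\n']:
--         index += 1
--
--     while index < len(text):
--         if not text[index] == ' ' or\
--            not text[index - 1] == ' ':
--             formated_text += text[index]
--
--         index += 1
--
--     return formated_text
-- ===== SOURCE B (Python) =====
-- import re
--
-- def format_spaces(text: str) -> str:
--     # Strip only leading spaces (A's skip loop matches only ' ': the r'\n'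
--     # token is a two-char literal that never equals a single char), then
--     # collapse every maximal run of spaces to a single space.
--     return re.sub(' +', ' ', text.lstrip(' '))
-- ===== Notes on version B (the rewrite author's own statement) =====
-- stated objective: faster
-- what changed: Replaces the index loop with previous-character bookkeeping and quadratic string concatenation by stripping leading spaces and collapsing each run of spaces with a single regex substitution.
import Mathlib
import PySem

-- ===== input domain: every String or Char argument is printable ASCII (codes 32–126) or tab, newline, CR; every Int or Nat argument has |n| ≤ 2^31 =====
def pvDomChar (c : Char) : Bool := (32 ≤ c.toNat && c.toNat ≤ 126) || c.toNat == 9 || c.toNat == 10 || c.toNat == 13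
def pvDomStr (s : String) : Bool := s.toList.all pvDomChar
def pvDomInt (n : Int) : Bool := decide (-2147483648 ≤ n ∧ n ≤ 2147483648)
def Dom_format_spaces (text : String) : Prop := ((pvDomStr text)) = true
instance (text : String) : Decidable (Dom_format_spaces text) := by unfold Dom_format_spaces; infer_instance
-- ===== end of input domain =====

-- B replaces A's index loop with lstrip(' ') + a regex collapsing runs of spaces (more idiomatic).


-- ===== PORT A =====
-- first while loop: skip while text[index] in [' ', r'\n'] (r'\n' is the
-- two-character string "\\n", compared against the one-character string text[index])
def pvSkipA (cs : List Char) (i : Nat) : Nat :=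
  if h : i < cs.length then
    if cs[i] = ' ' ∨ String.ofList [cs[i]] = "\\n" then pvSkipA cs (i + 1) else i
  else i
termination_by cs.length - i
decreasing_by omega

-- second while loop: append text[index] unless it and text[index-1] are both ' '
-- (text[index-1] via pyGet?: Python's negative-index wraparound at index = 0)
def pvBuildA (cs : List Char) (i : Nat) (acc : List Char) : List Char :=
  if h : i < cs.length then
    pvBuildA cs (i + 1)
      (if ¬ cs[i] = ' ' ∨ ¬ PySem.List.pyGet? cs ((i : Int) - 1) = some ' '
       then acc ++ [cs[i]] else acc)
  else acc
termination_by cs.length - i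
decreasing_by omega

def format_spaces (text : String) : String :=
  String.ofList (pvBuildA text.toList (pvSkipA text.toList 0) [])

-- ===== PORT B =====
-- re.sub(' +', ' ', ·): each maximal run of spaces becomes one space
def pvCollapse : List Char → List Char
  | [] => []
  | c :: rest =>
      if c = ' ' then ' ' :: pvCollapse (rest.dropWhile (· = ' '))
      else c :: pvCollapse rest
termination_by l => l.length
decreasing_by
  · exact Nat.lt_succ_of_le (rest.length_dropWhile_le _)
  · simp

-- text.lstrip(' ') then the substitution
def format_spaces_alt (text : String) : String :=
  String.ofList (pvCollapse (text.toList.dropWhile (· = ' ')))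

-- ===== PRECONDITION & SPEC =====
def Spec_format_spaces (text : String) (out : String) : Prop := out = format_spaces_alt text
instance (text : String) (out : String) : Decidable (Spec_format_spaces text out) := by unfold Spec_format_spaces; infer_instance

-- ===== CLAIM (what is proved, stated in full; the proofs are below) =====
def Claim_equal_format_spaces : Prop := ∀ (text : String), Dom_format_spaces text → Spec_format_spaces text (format_spaces text)

-- ===== LEMMAS AND PROOFS =====

-- A's second loop, rephrased on the suffix with a 'previous char was a space' flag
def pvBuildL (b : Bool) : List Char → List Char
  | [] => []
  | c :: rest =>
      if ¬ c = ' ' ∨ b = false then c :: pvBuildL (decide (c = ' ')) rest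
      else pvBuildL (decide (c = ' ')) rest

lemma ofList_single_ne_rn (c : Char) : String.ofList [c] ≠ "\\n" := by
  intro h
  have h2 := congrArg String.length h
  simp at h2
  exact absurd h2 (by decide)

lemma skipA_eq (cs : List Char) (i : Nat) :
    pvSkipA cs i = i + ((cs.drop i).takeWhile (· = ' ')).length := by
  induction i using pvSkipA.induct cs with
  | case1 i h hc ih =>
    rw [pvSkipA, dif_pos h, if_pos hc]
    rcases hc with hc | hc
    · rw [List.drop_eq_getElem_cons h, List.takeWhile_cons, if_pos (by simpa using hc)]
      simp [ih]; omega
    · exact absurd hc (ofList_single_ne_rn _)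
  | case2 i h hc =>
    rw [pvSkipA, dif_pos h, if_neg hc]
    have hc' : ¬ cs[i] = ' ' := fun h' => hc (Or.inl h')
    rw [List.drop_eq_getElem_cons h, List.takeWhile_cons, if_neg (by simpa using hc')]
    simp
  | case3 i h =>
    rw [pvSkipA, dif_neg h, List.drop_eq_nil_of_le (by omega)]
    simp

lemma drop_length_takeWhile (p : Char → Bool) (cs : List Char) :
    cs.drop (cs.takeWhile p).length = cs.dropWhile p := by
  induction cs with
  | nil => simp
  | cons c rest ih =>
    by_cases hp : p c
    · simp [hp, ih]
    · simp [hp]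

lemma buildA_eq (cs : List Char) : ∀ (n i : Nat) (acc : List Char), cs.length - i = n →
    pvBuildA cs i acc
      = acc ++ pvBuildL (PySem.List.pyGet? cs ((i : Int) - 1) == some ' ') (cs.drop i) := by
  intro n
  induction n with
  | zero =>
    intro i acc hn
    rw [pvBuildA, dif_neg (by omega), List.drop_eq_nil_of_le (by omega), pvBuildL]
    simp
  | succ n ih =>
    intro i acc hn
    have h : i < cs.length := by omega
    have hget : PySem.List.pyGet? cs (((i + 1 : Nat) : Int) - 1) = some cs[i] := by
      have he : (((i + 1 : Nat) : Int) - 1) = ((i : Nat) : Int) := by push_cast; ring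
      rw [he, PySem.List.pyGet?_natCast, List.getElem?_eq_getElem h]
    have hbeq : (some cs[i] == some ' ') = decide (cs[i] = ' ') := by by_cases hc : cs[i] = ' ' <;> simp [hc]
    rw [pvBuildA, dif_pos h, ih (i + 1) _ (by omega),
      List.drop_eq_getElem_cons h, pvBuildL, hget, hbeq]
    by_cases hcond : ¬ cs[i] = ' ' ∨ ¬ PySem.List.pyGet? cs ((i : Int) - 1) = some ' '
    · rw [if_pos hcond, if_pos (by
        rcases hcond with hc | hc
        · exact Or.inl hc
        · exact Or.inr (by simpa using hc))]
      simp
    · rw [if_neg hcond, if_neg (by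
        rintro (hc | hc)
        · exact hcond (Or.inl hc)
        · exact hcond (Or.inr (by simpa using hc)))]

lemma buildL_true (l : List Char) :
    pvBuildL true l = pvBuildL false (l.dropWhile (· = ' ')) := by
  induction l with
  | nil => simp [pvBuildL]
  | cons c rest ih =>
    by_cases hc : c = ' '
    · subst hc
      simp [pvBuildL, ih]
    · simp [pvBuildL, hc]

lemma buildL_false (l : List Char) : pvBuildL false l = pvCollapse l := by
  induction l using pvCollapse.induct with
  | case1 => simp [pvBuildL, pvCollapse]
  | case2 rest ih =>
    rw [pvBuildL, if_pos (Or.inr rfl), pvCollapse, if_pos rfl]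
    simpa [buildL_true] using ih
  | case3 c rest hc ih =>
    rw [pvBuildL, if_pos (Or.inl hc), pvCollapse, if_neg hc]
    simp [hc, ih]

lemma dropWhile_head_not (p : Char → Bool) (cs : List Char) (c : Char) (rest : List Char)
    (h : cs.dropWhile p = c :: rest) : p c = false := by
  induction cs with
  | nil => simp at h
  | cons a t ih =>
    rw [List.dropWhile_cons] at h
    by_cases hp : p a
    · exact ih (by simpa [hp] using h)
    · rw [if_neg (by simpa using hp)] at h
      cases h
      simpa using hp

lemma buildL_dropWhile (b : Bool) (cs : List Char) :
    pvBuildL b (cs.dropWhile (· = ' ')) = pvBuildL false (cs.dropWhile (· = ' ')) := by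
  cases hd : cs.dropWhile (· = ' ') with
  | nil => simp [pvBuildL]
  | cons c rest =>
    have hc : ¬ c = ' ' := by simpa using dropWhile_head_not _ cs c rest hd
    rw [pvBuildL, if_pos (Or.inl hc), pvBuildL, if_pos (Or.inl hc)]

-- ===== VERDICT (by name: the statement is the Claim_ definition above) =====
theorem format_spaces_spec : Claim_equal_format_spaces := by
  intro text _
  show _ = _
  unfold format_spaces format_spaces_alt
  rw [buildA_eq text.toList _ _ [] rfl, skipA_eq, Nat.zero_add, List.drop_zero,
    drop_length_takeWhile, buildL_dropWhile, buildL_false, List.nil_append]
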